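-- pv_equiv track=rewrite | github.com/saeedehAsheri/Python_projects | Python_Module_03/ex5/ft_data_stream.py | game_event_generator
-- ===== SOURCE A (Python) =====
-- def game_event_generator(total_events):
--     """
--     Generate a stream of game events using a pattern.
--
--     This function simulates game data without using random libraries.
--     It yields data one by one to save memory.
--
--     Args:
--         total_events (int): The total number of events to generate.
--
--     Yields:
--         tuple: A tuple containing (player_name, level, action_type).
--     """
--     names = ["alice", "bob", "charlie", "dave", "eve"]
--     actions = ["killed monster", "found treasure", "leveled up", "died"]
--
--     n_names = len(names)
--     n_actions = len(actions)
--
--     for i in range(total_events):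
--         name = names[i % n_names]
--
--         level = (i % 20) + 1
--
--         action = actions[i % n_actions]
--
--         yield (name, level, action)
-- ===== SOURCE B (Python) =====
-- def game_event_generator(total_events):
--     """Yield (player_name, level, action) tuples from a precomputed 20-entry
--     pattern table (period lcm(5, 20, 4) = 20) instead of recomputing three
--     modular indices per event."""
--     names = ["alice", "bob", "charlie", "dave", "eve"]
--     actions = ["killed monster", "found treasure", "leveled up", "died"]
--     cycle = [(names[r % 5], r + 1, actions[r % 4]) for r in range(20)]
--     for i in range(total_events):
--         yield cycle[i % 20]
-- ===== Notes on version B (the rewrite author's own statement) =====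
-- stated objective: alternative
-- what changed: B precomputes the full 20-tuple period (lcm(5,20,4)=20) as a pattern table once, then emits cycle[i % 20], replacing the per-event computation of three separate modular indices into two lists.
import Mathlib
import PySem

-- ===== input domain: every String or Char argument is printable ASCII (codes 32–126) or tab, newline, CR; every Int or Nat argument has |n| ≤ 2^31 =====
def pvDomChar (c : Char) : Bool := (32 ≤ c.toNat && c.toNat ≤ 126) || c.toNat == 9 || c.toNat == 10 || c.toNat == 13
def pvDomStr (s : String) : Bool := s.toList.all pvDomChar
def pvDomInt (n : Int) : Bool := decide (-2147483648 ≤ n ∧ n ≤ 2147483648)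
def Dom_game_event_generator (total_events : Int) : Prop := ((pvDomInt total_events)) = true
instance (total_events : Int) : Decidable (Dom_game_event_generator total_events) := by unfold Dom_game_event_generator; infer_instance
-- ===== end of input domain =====

-- ===== PORT A =====
-- Port of A: per-event modular indexing into names/actions; the generator's yields collected in order.
def pvNames : List String := ["alice", "bob", "charlie", "dave", "eve"]
def pvActions : List String := ["killed monster", "found treasure", "leveled up", "died"]
def game_event_generator (total_events : Int) : List (String × Int × String) :=
  (PySem.List.pyRange 0 total_events 1).map (fun i =>
    (PySem.List.pyGetD pvNames (PySem.Int.mod i 5) "",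
     PySem.Int.mod i 20 + 1,
     PySem.List.pyGetD pvActions (PySem.Int.mod i 4) ""))

-- ===== PORT B =====
-- Port of B: the 20-entry pattern table built once, then indexed by i % 20.
def pvCycle : List (String × Int × String) :=
  (PySem.List.pyRange 0 20 1).map (fun r =>
    (PySem.List.pyGetD pvNames (PySem.Int.mod r 5) "",
     r + 1,
     PySem.List.pyGetD pvActions (PySem.Int.mod r 4) ""))
def game_event_generator_alt (total_events : Int) : List (String × Int × String) :=
  (PySem.List.pyRange 0 total_events 1).map (fun i =>
    PySem.List.pyGetD pvCycle (PySem.Int.mod i 20) ("", 0, ""))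

-- ===== PRECONDITION & SPEC =====
def Spec_game_event_generator (total_events : Int) (out : List (String × Int × String)) : Prop := out = game_event_generator_alt total_events
instance (total_events : Int) (out : List (String × Int × String)) : Decidable (Spec_game_event_generator total_events out) := by unfold Spec_game_event_generator; infer_instance

-- ===== CLAIM (what is proved, stated in full; the proofs are below) =====
def Claim_equal_game_event_generator : Prop := ∀ (total_events : Int), Dom_game_event_generator total_events → Spec_game_event_generator total_events (game_event_generator total_events)

-- ===== LEMMAS AND PROOFS =====

-- Reading the pattern table at r ∈ [0,20) gives exactly A's per-event tuple for index r.
theorem pvCycle_getD (r : Int) (h0 : 0 ≤ r) (h1 : r < 20) :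
    PySem.List.pyGetD pvCycle r ("", 0, "") =
      (PySem.List.pyGetD pvNames (PySem.Int.mod r 5) "",
       PySem.Int.mod r 20 + 1,
       PySem.List.pyGetD pvActions (PySem.Int.mod r 4) "") := by
  interval_cases r <;> decide

-- ===== VERDICT (by name: the statement is the Claim_ definition above) =====
theorem game_event_generator_spec : Claim_equal_game_event_generator := by
  intro n _
  unfold Spec_game_event_generator game_event_generator game_event_generator_alt
  refine (List.map_congr_left ?_).symm
  intro i hi
  have h0 : 0 ≤ i := ((PySem.List.mem_pyRange_one).1 hi).1
  rw [pvCycle_getD _ (PySem.Int.mod_nonneg i (by norm_num)) (PySem.Int.mod_lt i (by norm_num))]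
  have key : ∀ c : Int, 0 < c → c ∣ 20 → PySem.Int.mod (PySem.Int.mod i 20) c = PySem.Int.mod i c := by
    intro c hc hdvd
    rw [PySem.Int.mod_eq_emod_of_pos (by norm_num : (0:Int) < 20),
        PySem.Int.mod_eq_emod_of_pos hc, PySem.Int.mod_eq_emod_of_pos hc]
    exact Int.emod_emod_of_dvd i hdvd
  rw [key 5 (by norm_num) (by norm_num), key 4 (by norm_num) (by norm_num),
      key 20 (by norm_num) (by norm_num)]
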